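-- pv_equiv track=rewrite | github.com/bryantolmos/COLOR-PALETTE-PROJECT | image_processing.py | dictionary_mapping
-- ===== SOURCE A (Python) =====
-- def dictionary_mapping(source_arr, target_arr):
--     # initialize mapped dict
--     mapped_dict = {}
--
--     # map source to target
--     if (len(source_arr) >= len(target_arr)):
--         for i in range(0,len(target_arr)):
--             mapped_dict[target_arr[i]] = source_arr[i]
--         return mapped_dict
--     else:
--         # mapping based on the length of source arr
--         for i in range(0,len(source_arr)):
--             mapped_dict[target_arr[i]] = source_arr[i]
--         # finishing the rest of the mapping
--         # from the remaining index from above to the end or the len of array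
--         remaining = len(target_arr) - (len(target_arr) - len(source_arr))
--         for i in range(len(target_arr) - (len(target_arr) - len(source_arr)), len(target_arr)):
--             if (i - remaining == len(target_arr) - (len(target_arr) - len(source_arr))):
--                 remaining = remaining + len(target_arr) - (len(target_arr) - len(source_arr))
--
--             mapped_dict[target_arr[i]] = source_arr[i - remaining]
--
--         return mapped_dict
-- ===== SOURCE B (Python) =====
-- def dictionary_mapping(source_arr, target_arr):
--     # single pass over target_arr with a wrap-around source index
--     mapped_dict = {}
--     j = 0
--     for key in target_arr:
--         mapped_dict[key] = source_arr[j]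
--         j += 1
--         if j == len(source_arr):
--             j = 0
--     return mapped_dict
-- ===== Notes on version B (the rewrite author's own statement) =====
-- stated objective: simpler
-- what changed: Replaces A's length-comparison branch with two index loops and a hand-maintained 'remaining' offset counter by one uniform pass over target_arr keeping a wrap-around source index that resets to 0 when it reaches len(source_arr).
import Mathlib
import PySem

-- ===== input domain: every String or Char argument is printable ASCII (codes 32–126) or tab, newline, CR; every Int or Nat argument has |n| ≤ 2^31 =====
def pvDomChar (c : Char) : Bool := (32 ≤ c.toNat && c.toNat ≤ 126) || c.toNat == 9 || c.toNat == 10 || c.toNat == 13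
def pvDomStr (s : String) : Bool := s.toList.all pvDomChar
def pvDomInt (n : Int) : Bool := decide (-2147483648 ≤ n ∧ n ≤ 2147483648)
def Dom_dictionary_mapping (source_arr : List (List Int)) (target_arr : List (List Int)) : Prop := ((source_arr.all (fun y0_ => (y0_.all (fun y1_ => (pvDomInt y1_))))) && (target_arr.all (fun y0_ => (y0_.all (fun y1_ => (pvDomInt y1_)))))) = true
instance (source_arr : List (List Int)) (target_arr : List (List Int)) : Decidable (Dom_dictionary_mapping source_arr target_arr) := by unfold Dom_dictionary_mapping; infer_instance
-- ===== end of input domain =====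

-- B replaces A's two-branch, offset-counter mapping by one uniform pass over target_arr
-- with a wrap-around source index (objective: simpler).

-- ===== PORT A =====
-- All indices are in range on Pre_ (source_arr ≠ [] or target_arr = []), so pyGetD's default is never read there.
def dictionary_mapping (source_arr : List (List Int)) (target_arr : List (List Int)) : List (List Int × List Int) :=
  let mapped_dict : PySem.Dict (List Int) (List Int) := PySem.Dict.empty
  if (source_arr.length : Int) ≥ (target_arr.length : Int) then
    ((PySem.List.pyRange 0 (target_arr.length : Int)).foldl
      (fun d i => d.insert (PySem.List.pyGetD target_arr i []) (PySem.List.pyGetD source_arr i []))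
      mapped_dict).items
  else
    let d1 := (PySem.List.pyRange 0 (source_arr.length : Int)).foldl
      (fun d i => d.insert (PySem.List.pyGetD target_arr i []) (PySem.List.pyGetD source_arr i []))
      mapped_dict
    let remaining : Int := (target_arr.length : Int) - ((target_arr.length : Int) - (source_arr.length : Int))
    let st := (PySem.List.pyRange ((target_arr.length : Int) - ((target_arr.length : Int) - (source_arr.length : Int))) (target_arr.length : Int)).foldl
      (fun (p : Int × PySem.Dict (List Int) (List Int)) i =>
        let rem : Int := if i - p.1 = (target_arr.length : Int) - ((target_arr.length : Int) - (source_arr.length : Int))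
          then p.1 + (target_arr.length : Int) - ((target_arr.length : Int) - (source_arr.length : Int)) else p.1
        (rem, p.2.insert (PySem.List.pyGetD target_arr i []) (PySem.List.pyGetD source_arr (i - rem) [])))
      (remaining, d1)
    st.2.items

-- ===== PORT B =====
def pvAltLoop (source_arr : List (List Int)) : List (List Int) → Int → PySem.Dict (List Int) (List Int) → PySem.Dict (List Int) (List Int)
  | [], _, d => d
  | key :: rest, j, d =>
    let d' := d.insert key (PySem.List.pyGetD source_arr j [])
    let j' := j + 1
    pvAltLoop source_arr rest (if j' = (source_arr.length : Int) then 0 else j') d'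

def dictionary_mapping_alt (source_arr : List (List Int)) (target_arr : List (List Int)) : List (List Int × List Int) :=
  (pvAltLoop source_arr target_arr 0 PySem.Dict.empty).items

-- ===== PRECONDITION & SPEC =====
-- Pre_ excludes exactly the inputs where A raises IndexError (empty source_arr with non-empty target_arr); B raises there too.
def Pre_dictionary_mapping (source_arr : List (List Int)) (target_arr : List (List Int)) : Prop :=
  source_arr ≠ [] ∨ target_arr = []
instance (source_arr : List (List Int)) (target_arr : List (List Int)) : Decidable (Pre_dictionary_mapping source_arr target_arr) := by unfold Pre_dictionary_mapping; infer_instance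
def pvWitness_dictionary_mapping : List (List Int) × List (List Int) := ([[1], [2]], [[3], [4], [5]])

def Spec_dictionary_mapping (source_arr : List (List Int)) (target_arr : List (List Int)) (out : List (List Int × List Int)) : Prop := out = dictionary_mapping_alt source_arr target_arr
instance (source_arr : List (List Int)) (target_arr : List (List Int)) (out : List (List Int × List Int)) : Decidable (Spec_dictionary_mapping source_arr target_arr out) := by unfold Spec_dictionary_mapping; infer_instance

-- ===== CLAIM (what is proved, stated in full; the proofs are below) =====
def Claim_equal_dictionary_mapping : Prop := ∀ (source_arr : List (List Int)) (target_arr : List (List Int)), Dom_dictionary_mapping source_arr target_arr → Pre_dictionary_mapping source_arr target_arr → Spec_dictionary_mapping source_arr target_arr (dictionary_mapping source_arr target_arr)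

-- ===== LEMMAS AND PROOFS =====

-- reference spine: insert target[k] ↦ source[k % len(source)] for k in ks
def pvSpine (s t : List (List Int)) (d : PySem.Dict (List Int) (List Int)) (ks : List ℕ) : PySem.Dict (List Int) (List Int) :=
  ks.foldl (fun (d : PySem.Dict (List Int) (List Int)) (k : ℕ) => d.insert (PySem.List.pyGetD t (k : Int) []) (PySem.List.pyGetD s ((k % s.length : ℕ) : Int) [])) d

lemma pvSpine_append (s t : List (List Int)) (d : PySem.Dict (List Int) (List Int)) (ks1 ks2 : List ℕ) :
    pvSpine s t d (ks1 ++ ks2) = pvSpine s t (pvSpine s t d ks1) ks2 := by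
  unfold pvSpine; exact List.foldl_append

lemma pvSuccMod (m i : ℕ) (h0 : 0 < m) : (i+1) % m = if i % m + 1 = m then 0 else i % m + 1 := by
  have hd := Nat.div_add_mod i m
  have hr : i % m < m := Nat.mod_lt _ h0
  by_cases h : i % m + 1 = m
  · rw [if_pos h]
    have h2 : i + 1 = m * (i / m + 1) := by rw [Nat.mul_succ]; omega
    rw [h2, Nat.mul_mod_right]
  · rw [if_neg h]
    have h2 : i + 1 = m * (i / m) + (i % m + 1) := by omega
    rw [h2, Nat.mul_add_mod, Nat.mod_eq_of_lt (by omega)]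

lemma pvSuccDiv (m i : ℕ) (h0 : 0 < m) : (i+1) / m = if i % m + 1 = m then i / m + 1 else i / m := by
  have hd := Nat.div_add_mod i m
  have hr : i % m < m := Nat.mod_lt _ h0
  by_cases h : i % m + 1 = m
  · rw [if_pos h]
    have h2 : i + 1 = m * (i / m + 1) := by rw [Nat.mul_succ]; omega
    rw [h2, Nat.mul_div_cancel_left _ h0]
  · rw [if_neg h]
    have h2 : i + 1 = m * (i / m) + (i % m + 1) := by omega
    rw [h2, Nat.mul_add_div h0, Nat.div_eq_of_lt (show i % m + 1 < m by omega), Nat.add_zero]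

-- B's loop computes the spine
lemma pvAlt_spine (s t : List (List Int)) (h0 : 0 < s.length) :
    ∀ (l : List (List Int)) (i : ℕ) (d : PySem.Dict (List Int) (List Int)), t.drop i = l →
      pvAltLoop s l ((i % s.length : ℕ) : Int) d = pvSpine s t d (List.range' i l.length) := by
  intro l
  induction l with
  | nil => intro i d _; simp [pvAltLoop, pvSpine]
  | cons a rest ih =>
    intro i d h
    have hi : i < t.length := by
      by_contra hc
      rw [List.drop_eq_nil_of_le (by omega)] at h
      simp at h
    have ha : PySem.List.pyGetD t (i : Int) [] = a := by
      rw [PySem.List.pyGetD_natCast]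
      have h1 : (t.drop i).head? = some a := by rw [h]; rfl
      rw [List.head?_drop] at h1
      simp [List.getD_eq_getElem?_getD, h1]
    have hd1 : t.drop (i+1) = rest := by
      have : t.drop (i+1) = (t.drop i).drop 1 := by rw [List.drop_drop]
      rw [this, h]; rfl
    have hstep : (if ((i % s.length : ℕ) : Int) + 1 = (s.length : Int) then (0 : Int) else ((i % s.length : ℕ) : Int) + 1)
        = (((i+1) % s.length : ℕ) : Int) := by
      by_cases hc : i % s.length + 1 = s.length
      · rw [if_pos (by exact_mod_cast hc), pvSuccMod _ _ h0, if_pos hc]; simp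
      · rw [if_neg (by exact_mod_cast hc), pvSuccMod _ _ h0, if_neg hc]; push_cast; ring
    show pvAltLoop s rest _ _ = _
    rw [hstep, ih (i+1) _ hd1]
    have hr : List.range' i (rest.length + 1) = i :: List.range' (i+1) rest.length := by rw [List.range'_succ]
    rw [show (a :: rest).length = rest.length + 1 from rfl, hr]
    unfold pvSpine
    rw [List.foldl_cons, ha]

-- A's plain index loop (used for the first len(source) or all len(target) indices) computes the spine
lemma pvA_initial (s t : List (List Int)) (d : PySem.Dict (List Int) (List Int)) (k : ℕ) (hk : k ≤ s.length) :
    (PySem.List.pyRange 0 (k : Int)).foldl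
        (fun d i => d.insert (PySem.List.pyGetD t i []) (PySem.List.pyGetD s i [])) d
      = pvSpine s t d (List.range' 0 k) := by
  rw [PySem.List.pyRange_zero_natCast, List.foldl_map]
  unfold pvSpine
  rw [← List.range_eq_range']
  apply PySem.List.foldl_congr_mem
  intro acc x hx
  have hx' : x < k := List.mem_range.mp hx
  rw [Nat.mod_eq_of_lt (by omega)]

-- A's second loop with the 'remaining' counter computes the spine of the remaining indices
lemma pvA_loop2 (s t : List (List Int)) (h0 : 0 < s.length) :
    ∀ (c i : ℕ) (rem : Int) (d : PySem.Dict (List Int) (List Int)), i + c = t.length → s.length ≤ i →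
      (if (i : Int) - rem = (s.length : Int) then rem + (s.length : Int) else rem)
        = (s.length : Int) * ((i / s.length : ℕ) : Int) →
      ((PySem.List.pyRange (i : Int) (t.length : Int)).foldl
          (fun (p : Int × PySem.Dict (List Int) (List Int)) i =>
            (if i - p.1 = (s.length : Int)
              then p.1 + (t.length : Int) - ((t.length : Int) - (s.length : Int)) else p.1,
             p.2.insert (PySem.List.pyGetD t i [])
               (PySem.List.pyGetD s (i - (if i - p.1 = (s.length : Int)
                 then p.1 + (t.length : Int) - ((t.length : Int) - (s.length : Int)) else p.1)) [])))
          (rem, d)).2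
        = pvSpine s t d (List.range' i c) := by
  intro c
  induction c with
  | zero =>
    intro i rem d hic _ _
    have hin : (i : Int) = (t.length : Int) := by exact_mod_cast congrArg Nat.cast (by omega : i = t.length)
    rw [hin]
    simp [PySem.List.pyRange, pvSpine]
  | succ c ih =>
    intro i rem d hic hmi hinv
    have hin : (i : Int) < (t.length : Int) := by exact_mod_cast (by omega : i < t.length)
    rw [PySem.List.pyRange_one_cons hin, List.foldl_cons]
    have hd := Nat.div_add_mod i s.length
    have hd' : (s.length : Int) * ((i / s.length : ℕ) : Int) + ((i % s.length : ℕ) : Int) = (i : Int) := by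
      exact_mod_cast hd
    have hr : i % s.length < s.length := Nat.mod_lt _ h0
    -- the updated counter equals m * (i / m)
    have hrem' : (if (i : Int) - rem = (s.length : Int) then rem + (t.length : Int) - ((t.length : Int) - (s.length : Int)) else rem)
        = (s.length : Int) * ((i / s.length : ℕ) : Int) := by
      by_cases hc : (i : Int) - rem = (s.length : Int)
      · rw [if_pos hc]; rw [if_pos hc] at hinv; linarith [hinv]
      · rw [if_neg hc]; rw [if_neg hc] at hinv; exact hinv
    simp only [hrem']
    -- the used source index is i % m
    have hidx : (i : Int) - (s.length : Int) * ((i / s.length : ℕ) : Int) = ((i % s.length : ℕ) : Int) := by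
      linarith [hd']
    rw [hidx]
    -- re-establish the invariant at i+1 and apply the IH
    have hinv' : (if ((i+1 : ℕ) : Int) - (s.length : Int) * ((i / s.length : ℕ) : Int) = (s.length : Int)
          then (s.length : Int) * ((i / s.length : ℕ) : Int) + (s.length : Int)
          else (s.length : Int) * ((i / s.length : ℕ) : Int))
        = (s.length : Int) * (((i+1) / s.length : ℕ) : Int) := by
      by_cases hc : i % s.length + 1 = s.length
      · have hcI : ((i+1 : ℕ) : Int) - (s.length : Int) * ((i / s.length : ℕ) : Int) = (s.length : Int) := by
          push_cast; push_cast at hd'; linarith [hd']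
        rw [if_pos hcI, pvSuccDiv _ _ h0, if_pos hc]; push_cast; ring
      · have hcI : ¬ (((i+1 : ℕ) : Int) - (s.length : Int) * ((i / s.length : ℕ) : Int) = (s.length : Int)) := by
          intro hEq
          apply hc
          have : ((i % s.length : ℕ) : Int) + 1 = (s.length : Int) := by push_cast at hEq ⊢; linarith [hd']
          exact_mod_cast this
        rw [if_neg hcI, pvSuccDiv _ _ h0, if_neg hc]
    have ihs := ih (i+1) ((s.length : Int) * ((i / s.length : ℕ) : Int))
      (d.insert (PySem.List.pyGetD t (i : Int) []) (PySem.List.pyGetD s ((i % s.length : ℕ) : Int) []))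
      (by omega) (by omega) hinv'
    rw [show ((i+1 : ℕ) : Int) = (i : Int) + 1 by push_cast; ring] at ihs
    rw [ihs]
    rw [List.range'_succ]
    unfold pvSpine
    rw [List.foldl_cons]

-- ===== VERDICT (by name: the statement is the Claim_ definition above) =====
theorem dictionary_mapping_spec : Claim_equal_dictionary_mapping := by
  intro s t _ hpre
  unfold Spec_dictionary_mapping
  by_cases ht : t = []
  · subst ht
    simp [dictionary_mapping, dictionary_mapping_alt, pvAltLoop, PySem.List.pyRange]
  · have hs : s ≠ [] := by
      rcases hpre with hs | h
      · exact hs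
      · exact absurd h ht
    have h0 : 0 < s.length := List.length_pos_iff.mpr hs
    -- B side
    have hB : dictionary_mapping_alt s t = (pvSpine s t PySem.Dict.empty (List.range' 0 t.length)).items := by
      unfold dictionary_mapping_alt
      have := pvAlt_spine s t h0 t 0 PySem.Dict.empty (by simp)
      simp only [Nat.zero_mod, Nat.cast_zero] at this
      rw [this]
    rw [hB]
    -- A side
    unfold dictionary_mapping
    by_cases hge : (s.length : Int) ≥ (t.length : Int)
    · rw [if_pos hge]
      rw [pvA_initial s t PySem.Dict.empty t.length (by exact_mod_cast hge)]
    · rw [if_neg hge]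
      have hmn : s.length < t.length := by exact_mod_cast (lt_of_not_ge hge)
      simp only
      have hnm : (t.length : Int) - ((t.length : Int) - (s.length : Int)) = (s.length : Int) := by ring
      rw [pvA_initial s t PySem.Dict.empty s.length le_rfl]
      rw [hnm]
      rw [pvA_loop2 s t h0 (t.length - s.length) s.length ((s.length : Int)) _ (by omega) le_rfl
        (by rw [if_neg (by omega), Nat.div_self h0]; push_cast; ring)]
      rw [← pvSpine_append]
      have hra := List.range'_append (s := 0) (m := s.length) (n := t.length - s.length) (step := 1)
      simp only [Nat.zero_add, Nat.one_mul] at hra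
      rw [show s.length + (t.length - s.length) = t.length by omega] at hra
      rw [hra]
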